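-- pv_equiv track=rewrite | github.com/alexanderseo/margroidapp | compare/views.py | generate_comparison_dict
-- ===== SOURCE A (Python) =====
-- def generate_comparison_dict(ids):
--     result = {}
--     if len(ids) == 1:
--         result[ids[0]] = 4
--     elif len(ids) == 2:
--         result[ids[0]] = 2
--         result[ids[1]] = 2
--     elif len(ids) == 3:
--         result[ids[0]] = 2
--         result[ids[1]] = 1
--         result[ids[2]] = 1
--     else:
--         for ind in range(len(ids)):
--             result[ids[ind]] = 1
--     return result
-- ===== SOURCE B (Python) =====
-- def generate_comparison_dict(ids):
--     # Weights come from dividing a fixed budget of 4 as evenly as possible over the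
--     # positions, each position getting at least 1: w_k = max(1, 4//n + (1 if k < 4%n else 0)).
--     # For n=1,2,3 this yields (4), (2,2), (2,1,1); for n>=4 it is 1 everywhere.
--     n = len(ids)
--     result = {}
--     for k, i in enumerate(ids):
--         result[i] = max(1, 4 // n + (1 if k < 4 % n else 0))
--     return result
-- ===== Notes on version B (the rewrite author's own statement) =====
-- stated objective: alternative
-- what changed: Replaces the four-way if/elif case analysis by a single uniform pass that computes each position's weight from a closed-form even-split of a fixed budget of 4 (w_k = max(1, 4//n + (1 if k < 4%n else 0))), with no branches on the list length.
import Mathlib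
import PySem

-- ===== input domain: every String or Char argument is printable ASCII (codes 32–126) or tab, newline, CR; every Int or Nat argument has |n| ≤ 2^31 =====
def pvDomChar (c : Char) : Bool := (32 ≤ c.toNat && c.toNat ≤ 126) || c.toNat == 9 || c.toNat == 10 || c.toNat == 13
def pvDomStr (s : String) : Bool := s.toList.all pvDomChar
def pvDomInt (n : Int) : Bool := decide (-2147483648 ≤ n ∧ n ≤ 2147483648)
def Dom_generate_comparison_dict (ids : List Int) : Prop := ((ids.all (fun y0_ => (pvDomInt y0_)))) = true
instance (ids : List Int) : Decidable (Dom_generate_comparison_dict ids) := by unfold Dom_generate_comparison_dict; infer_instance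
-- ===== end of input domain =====

-- B replaces A's if/elif length dispatch by one uniform pass computing each weight from a
-- closed-form budget split: w_k = max(1, 4//n + (1 if k < 4%n else 0)) (alternative decomposition).


-- ===== PORT A =====
def generate_comparison_dict (ids : List Int) : List (Int × Int) :=
  let result : PySem.Dict Int Int := PySem.Dict.empty
  if ids.length = 1 then
    (result.insert (PySem.List.pyGetD ids 0 0) 4).items
  else if ids.length = 2 then
    ((result.insert (PySem.List.pyGetD ids 0 0) 2).insert (PySem.List.pyGetD ids 1 0) 2).items
  else if ids.length = 3 then
    (((result.insert (PySem.List.pyGetD ids 0 0) 2).insert (PySem.List.pyGetD ids 1 0) 1).insert (PySem.List.pyGetD ids 2 0) 1).items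
  else
    ((PySem.List.pyRange 0 (ids.length : Int) 1).foldl
      (fun d ind => d.insert (PySem.List.pyGetD ids ind 0) 1) result).items

-- ===== PORT B =====
def generate_comparison_dict_alt (ids : List Int) : List (Int × Int) :=
  let n : Int := ids.length
  ((PySem.List.enumerate ids 0).foldl
    (fun (d : PySem.Dict Int Int) p =>
      d.insert p.2 (max 1 (PySem.Int.floordiv 4 n + if p.1 < PySem.Int.mod 4 n then 1 else 0)))
    PySem.Dict.empty).items

-- ===== PRECONDITION & SPEC =====
def Spec_generate_comparison_dict (ids : List Int) (out : List (Int × Int)) : Prop := out = generate_comparison_dict_alt ids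
instance (ids : List Int) (out : List (Int × Int)) : Decidable (Spec_generate_comparison_dict ids out) := by unfold Spec_generate_comparison_dict; infer_instance

-- ===== CLAIM (what is proved, stated in full; the proofs are below) =====
def Claim_equal_generate_comparison_dict : Prop := ∀ (ids : List Int), Dom_generate_comparison_dict ids → Spec_generate_comparison_dict ids (generate_comparison_dict ids)

-- ===== LEMMAS AND PROOFS =====

-- A fold over enumerate whose body ignores the index is the fold over the list itself.
theorem enum_fold_ignore_idx (l : List Int) (s : Int) (d0 : PySem.Dict Int Int) :
    (PySem.List.enumerate l s).foldl (fun d p => d.insert p.2 (1 : Int)) d0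
    = l.foldl (fun d i => d.insert i (1 : Int)) d0 := by
  induction l generalizing s d0 with
  | nil => rfl
  | cons x xs ih => simp [PySem.List.enumerate_cons, List.foldl, ih]

-- For n ≥ 4 the budget-split weight is 1 at every nonnegative position index.
theorem weight_one_of_ge_four (n : Int) (hn : 4 ≤ n) (k : Int) (hk : 0 ≤ k) :
    max 1 (PySem.Int.floordiv 4 n + if k < PySem.Int.mod 4 n then (1 : Int) else 0) = 1 := by
  have hpos : 0 < n := by omega
  rw [PySem.Int.floordiv_eq_ediv_of_pos hpos, PySem.Int.mod_eq_emod_of_pos hpos]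
  rcases eq_or_lt_of_le hn with h | h
  · rw [← h]
    norm_num
    omega
  · have h4 : (4 : Int) / n = 0 := Int.ediv_eq_zero_of_lt (by omega) h
    have hm : (4 : Int) % n = 4 := Int.emod_eq_of_lt (by omega) h
    rw [h4, hm]
    split_ifs <;> simp

-- ===== VERDICT (by name: the statement is the Claim_ definition above) =====
theorem generate_comparison_dict_spec : Claim_equal_generate_comparison_dict := by
  intro ids _
  unfold Spec_generate_comparison_dict generate_comparison_dict generate_comparison_dict_alt
  match ids with
  | [] => rfl
  | [a] =>
    norm_num [PySem.List.enumerate_cons, PySem.List.enumerate_nil, PySem.Int.floordiv,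
      PySem.Int.mod, PySem.List.pyGetD, PySem.List.pyGet?, PySem.List.pyIdx?, List.foldl]
  | [a, b] =>
    norm_num [PySem.List.enumerate_cons, PySem.List.enumerate_nil, PySem.Int.floordiv,
      PySem.Int.mod, PySem.List.pyGetD, PySem.List.pyGet?, PySem.List.pyIdx?, List.foldl,
      show Int.fdiv 4 2 = 2 from by decide, show Int.fmod 4 2 = 0 from by decide]
  | [a, b, c] =>
    norm_num [PySem.List.enumerate_cons, PySem.List.enumerate_nil, PySem.Int.floordiv,
      PySem.Int.mod, PySem.List.pyGetD, PySem.List.pyGet?, PySem.List.pyIdx?, List.foldl,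
      show Int.fdiv 4 3 = 1 from by decide, show Int.fmod 4 3 = 1 from by decide,
      show Int.toNat 2 = 2 from rfl]
  | a :: b :: c :: d :: rest =>
    have hlen : (a :: b :: c :: d :: rest).length = rest.length + 4 := by simp
    simp only [hlen]
    rw [if_neg (by omega), if_neg (by omega), if_neg (by omega)]
    have hn : (4 : Int) ≤ ((rest.length + 4 : Nat) : Int) := by
      push_cast; omega
    have hbody : (PySem.List.enumerate (a :: b :: c :: d :: rest) 0).foldl
        (fun (dd : PySem.Dict Int Int) (p : Int × Int) =>
          dd.insert p.2 (max 1 (PySem.Int.floordiv 4 ((rest.length + 4 : Nat) : Int)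
            + if p.1 < PySem.Int.mod 4 ((rest.length + 4 : Nat) : Int) then (1 : Int) else 0)))
        PySem.Dict.empty
        = (PySem.List.enumerate (a :: b :: c :: d :: rest) 0).foldl
            (fun (dd : PySem.Dict Int Int) (p : Int × Int) => dd.insert p.2 (1 : Int))
            PySem.Dict.empty := by
      apply PySem.List.foldl_congr_mem
      intro acc p hp
      obtain ⟨k, hk, rfl⟩ := (PySem.List.mem_enumerate_iff _ _ _).mp hp
      rw [weight_one_of_ge_four _ hn _ (by positivity)]
    rw [hbody]
    rw [enum_fold_ignore_idx]
    have := PySem.List.foldl_pyRange_zero_pyGetD' (a :: b :: c :: d :: rest) 0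
      (fun (dd : PySem.Dict Int Int) i => dd.insert i (1 : Int)) PySem.Dict.empty
    simp only [hlen] at this
    rw [this]
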